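-- pv_equiv track=rewrite | github.com/VM-Chinese-translate-group/Prominence-II-Chinese | extract_quests_v2.py | extract_strings_from_list
-- ===== SOURCE A (Python) =====
-- def extract_strings_from_list(list_content):
--     results = []
--     i = 0
--     in_quote = False
--     escape = False
--     current_start = -1
--     while i < len(list_content):
--         char = list_content[i]
--         if escape: escape = False
--         elif char == '\\': escape = True
--         elif char == '"':
--             if not in_quote:
--                 in_quote = True
--                 current_start = i
--             else:
--                 in_quote = False
--                 val = list_content[current_start+1:i]
--                 results.append((val, current_start, i+1))
--         i += 1
--     return results
-- ===== SOURCE B (Python) =====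
-- def extract_strings_from_list(list_content):
--     # Two-level scan: the outer loop skips escaped pairs and plain chars;
--     # on an opening quote an inner scan jumps straight to the matching
--     # unescaped closing quote and emits the slice between them.
--     results = []
--     n = len(list_content)
--     i = 0
--     while i < n:
--         c = list_content[i]
--         if c == '\\':
--             i += 2
--         elif c == '"':
--             j = i + 1
--             while j < n:
--                 d = list_content[j]
--                 if d == '\\':
--                     j += 2
--                 elif d == '"':
--                     results.append((list_content[i + 1:j], i, j + 1))
--                     break
--                 else:
--                     j += 1
--             else:
--                 return results  # unterminated string: nothing more to emit
--             i = j + 1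
--         else:
--             i += 1
--     return results
-- ===== Notes on version B (the rewrite author's own statement) =====
-- stated objective: alternative
-- what changed: Replaced A's single-pass three-flag state machine (escape/in_quote booleans updated per character) with a two-level scan: an outer loop that consumes escaped pairs in one step and, on an opening quote, an inner scan that jumps directly to the matching unescaped closing quote and emits the slice.
import Mathlib
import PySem

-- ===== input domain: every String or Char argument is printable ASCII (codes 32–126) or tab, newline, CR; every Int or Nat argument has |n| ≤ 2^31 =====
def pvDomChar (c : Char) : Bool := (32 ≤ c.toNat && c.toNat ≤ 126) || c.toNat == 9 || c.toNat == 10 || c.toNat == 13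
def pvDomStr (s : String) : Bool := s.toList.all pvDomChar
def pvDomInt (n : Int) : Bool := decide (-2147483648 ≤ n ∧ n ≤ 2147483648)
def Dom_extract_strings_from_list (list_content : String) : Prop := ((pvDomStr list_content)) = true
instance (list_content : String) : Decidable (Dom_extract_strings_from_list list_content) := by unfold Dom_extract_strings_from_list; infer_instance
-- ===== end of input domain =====

-- B replaces A's per-character flag machine by a two-level scan (outer skip + inner jump
-- to the matching quote); objective: alternative structure, same cost. Proved equal on all inputs.

-- s[a:b] on a string, via the char-list slice (exact: PySem.List.slice is Python's slice)
def pvSlice (orig : List Char) (a b : Int) : String := String.ofList (PySem.List.slice orig (some a) (some b))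

-- ===== PORT A =====
-- A's while-loop over indices, transliterated as recursion over the remaining characters,
-- carrying the index i and the state (in_quote, escape, current_start, results).
def pvLoopA (orig : List Char) : List Char → Int → Bool → Bool → Int →
    List (String × Int × Int) → List (String × Int × Int)
  | [], _, _, _, _, res => res
  | c :: cs, i, inq, esc, cstart, res =>
    if esc then pvLoopA orig cs (i + 1) inq false cstart res
    else if c = '\\' then pvLoopA orig cs (i + 1) inq true cstart res
    else if c = '"' then
      if !inq then pvLoopA orig cs (i + 1) true esc i res
      else pvLoopA orig cs (i + 1) false esc cstart
             (res ++ [(pvSlice orig (cstart + 1) i, cstart, i + 1)])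
    else pvLoopA orig cs (i + 1) inq esc cstart res

def extract_strings_from_list (list_content : String) : List (String × Int × Int) :=
  pvLoopA list_content.toList list_content.toList 0 false false (-1) []

-- ===== PORT B =====
-- inner while loop of Source B: scan from index j after an opening quote; 'j += 2' on a
-- backslash consumes two characters; returns the closing-quote index and the remaining
-- characters after it, or none when the loop runs off the end (unterminated string).
def pvInnerB : List Char → Int → Option (Int × List Char)
  | [], _ => none
  | d :: cs, j =>
    if d = '\\' then
      match cs with
      | [] => none
      | _ :: cs' => pvInnerB cs' (j + 2)
    else if d = '"' then some (j, cs)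
    else pvInnerB cs (j + 1)

theorem pvInnerB_length (cs : List Char) (j j' : Int) (rest : List Char)
    (h : pvInnerB cs j = some (j', rest)) : rest.length ≤ cs.length := by
  fun_induction pvInnerB cs j generalizing j' rest <;>
    simp_all <;> omega

-- outer while loop of Source B
def pvOuterB (orig : List Char) : List Char → Int → List (String × Int × Int) →
    List (String × Int × Int)
  | [], _, res => res
  | c :: cs, i, res =>
    if c = '\\' then
      match cs with
      | [] => res
      | _ :: cs' => pvOuterB orig cs' (i + 2) res
    else if c = '"' then
      match h : pvInnerB cs (i + 1) with
      | none => res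
      | some (j, rest) =>
          pvOuterB orig rest (j + 1) (res ++ [(pvSlice orig (i + 1) j, i, j + 1)])
    else pvOuterB orig cs (i + 1) res
  termination_by cs => cs.length
  decreasing_by
  all_goals simp
  have := pvInnerB_length _ _ _ _ h
  omega

def extract_strings_from_list_alt (list_content : String) : List (String × Int × Int) :=
  pvOuterB list_content.toList list_content.toList 0 []

-- ===== PRECONDITION & SPEC =====
def Spec_extract_strings_from_list (list_content : String) (out : List (String × Int × Int)) : Prop := out = extract_strings_from_list_alt list_content
instance (list_content : String) (out : List (String × Int × Int)) : Decidable (Spec_extract_strings_from_list list_content out) := by unfold Spec_extract_strings_from_list; infer_instance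

-- ===== CLAIM (what is proved, stated in full; the proofs are below) =====
def Claim_equal_extract_strings_from_list : Prop := ∀ (list_content : String), Dom_extract_strings_from_list list_content → Spec_extract_strings_from_list list_content (extract_strings_from_list list_content)

-- ===== LEMMAS AND PROOFS =====

theorem pv_main : ∀ (n : Nat) (cs : List Char), cs.length ≤ n →
    ∀ (orig : List Char) (i cstart : Int) (res : List (String × Int × Int)),
      pvLoopA orig cs i false false cstart res = pvOuterB orig cs i res ∧
      pvLoopA orig cs i true false cstart res =
        (match pvInnerB cs i with
         | none => res
         | some (j, rest) =>
             pvOuterB orig rest (j + 1)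
               (res ++ [(pvSlice orig (cstart + 1) j, cstart, j + 1)])) := by
  intro n
  induction n with
  | zero =>
    intro cs hcs orig i cstart res
    have h0 : cs = [] := List.eq_nil_of_length_eq_zero (Nat.le_zero.mp hcs)
    subst h0
    exact ⟨by simp [pvLoopA, pvOuterB], by simp [pvLoopA, pvInnerB]⟩
  | succ n ih =>
    intro cs hcs orig i cstart res
    cases cs with
    | nil => exact ⟨by simp [pvLoopA, pvOuterB], by simp [pvLoopA, pvInnerB]⟩
    | cons c cs =>
      have hlen : cs.length ≤ n := by simpa using hcs
      by_cases hb : c = '\\'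
      · subst hb
        cases cs with
        | nil => refine ⟨?_, ?_⟩ <;> simp [pvLoopA, pvOuterB, pvInnerB]
        | cons e cs' =>
          have hlen' : cs'.length ≤ n := by simp at hlen; omega
          have hi : i + 1 + 1 = i + 2 := by ring
          refine ⟨?_, ?_⟩
          · have h1 := (ih cs' hlen' orig (i + 2) cstart res).1
            simp only [pvLoopA, pvOuterB, if_true, ite_false, Bool.false_eq_true, hi]
            simpa [pvLoopA, pvOuterB] using h1
          · have h2 := (ih cs' hlen' orig (i + 2) cstart res).2
            simp only [pvLoopA, pvInnerB, hi]
            simpa [pvLoopA, pvInnerB] using h2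
      · by_cases hq : c = '"'
        · subst hq
          refine ⟨?_, ?_⟩
          · have h2 := (ih cs hlen orig (i + 1) i res).2
            rw [pvOuterB.eq_def]
            simp only [pvLoopA]
            rcases hin : pvInnerB cs (i + 1) with _ | ⟨j, rest⟩ <;>
              rw [hin] at h2 <;> simp <;> exact h2
          · have h1 := (ih cs hlen orig (i + 1) cstart
                (res ++ [(pvSlice orig (cstart + 1) i, cstart, i + 1)])).1
            have hin : pvInnerB ('"' :: cs) i = some (i, cs) := by
              rw [pvInnerB.eq_def]; simp
            rw [hin]
            simp only [pvLoopA]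
            exact h1
        · refine ⟨?_, ?_⟩
          · have h1 := (ih cs hlen orig (i + 1) cstart res).1
            rw [pvOuterB.eq_def]
            simp only [pvLoopA]
            simp only [hb, hq, if_false]
            exact h1
          · have h2 := (ih cs hlen orig (i + 1) cstart res).2
            have hin : pvInnerB (c :: cs) i = pvInnerB cs (i + 1) := by
              rw [pvInnerB.eq_def]; simp [hb, hq]
            rw [hin]
            simpa [pvLoopA, hb, hq] using h2

-- ===== VERDICT (by name: the statement is the Claim_ definition above) =====
theorem extract_strings_from_list_spec : Claim_equal_extract_strings_from_list := by
  intro s _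
  unfold Spec_extract_strings_from_list extract_strings_from_list extract_strings_from_list_alt
  exact (pv_main s.toList.length s.toList le_rfl s.toList 0 (-1) []).1
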